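-- pv_equiv track=rewrite | github.com/GeoBarnes/AdventofCode | Day1.py | last_dig
-- ===== SOURCE A (Python) =====
-- ints=[0,1,2,3,4,5,6,7,8,9]
--
-- def last_dig(the_iterable):
--     pos = len(the_iterable)
--     for i in the_iterable[::-1]:
--         pos = pos - 1
--         try:
--             if int(i) in ints:
--                 return (int(i), pos)
--         except:
--             pass
-- ===== SOURCE B (Python) =====
-- ints=[0,1,2,3,4,5,6,7,8,9]
--
-- def last_dig(the_iterable):
--     result = None
--     for idx, i in enumerate(the_iterable):
--         try:
--             v = int(i)
--             if v in ints:
--                 result = (v, idx)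
--         except:
--             pass
--     return result
-- ===== Notes on version B (the rewrite author's own statement) =====
-- stated objective: alternative
-- what changed: Replaced A's reverse traversal with early return by a single forward pass over enumerate keeping a 'last match' accumulator; no reversed copy of the list is built.
import Mathlib
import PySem

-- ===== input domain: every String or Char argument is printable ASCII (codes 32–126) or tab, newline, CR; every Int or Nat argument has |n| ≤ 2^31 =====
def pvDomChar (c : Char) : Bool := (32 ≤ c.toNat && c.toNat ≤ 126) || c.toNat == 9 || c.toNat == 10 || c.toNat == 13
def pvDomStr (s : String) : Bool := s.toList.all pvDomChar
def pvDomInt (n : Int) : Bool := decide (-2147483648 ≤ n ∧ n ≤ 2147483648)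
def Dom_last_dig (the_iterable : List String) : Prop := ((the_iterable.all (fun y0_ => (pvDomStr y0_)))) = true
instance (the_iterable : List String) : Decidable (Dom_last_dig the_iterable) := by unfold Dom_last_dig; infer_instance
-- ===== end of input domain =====

-- B replaces A's reverse traversal with early return by one forward pass keeping the last match (alternative decomposition, same cost).

-- ===== PORT A =====
-- ints = [0,1,2,3,4,5,6,7,8,9]
def pvInts : List Int := [0,1,2,3,4,5,6,7,8,9]

-- the for-loop over the_iterable[::-1] with early return; pos is the mutable counter
def last_dig_loopA : List String → Int → Option (Int × Int)
  | [], _ => none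
  | i :: rest, pos =>
    let pos' := pos - 1
    match PySem.Int.ofStr? i with          -- int(i); except: pass on ValueError
    | some n => if n ∈ pvInts then some (n, pos') else last_dig_loopA rest pos'
    | none => last_dig_loopA rest pos'

def last_dig (the_iterable : List String) : Option (Int × Int) :=
  -- the_iterable[::-1]
  match PySem.List.slice? the_iterable none none (-1) with
  | some rev => last_dig_loopA rev (the_iterable.length : Int)
  | none => none   -- unreachable: step ≠ 0

-- ===== PORT B =====
-- one step of the forward loop: state = (result, idx)
def last_dig_stepB (acc : Option (Int × Int) × Int) (i : String) : Option (Int × Int) × Int :=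
  (match PySem.Int.ofStr? i with           -- v = int(i); except: pass
   | some v => if v ∈ pvInts then some (v, acc.2) else acc.1
   | none => acc.1,
   acc.2 + 1)

def last_dig_alt (the_iterable : List String) : Option (Int × Int) :=
  (the_iterable.foldl last_dig_stepB (none, 0)).1

-- ===== PRECONDITION & SPEC =====
def Spec_last_dig (the_iterable : List String) (out : Option (Int × Int)) : Prop := out = last_dig_alt the_iterable
instance (the_iterable : List String) (out : Option (Int × Int)) : Decidable (Spec_last_dig the_iterable out) := by unfold Spec_last_dig; infer_instance

-- ===== CLAIM (what is proved, stated in full; the proofs are below) =====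
def Claim_equal_last_dig : Prop := ∀ (the_iterable : List String), Dom_last_dig the_iterable → Spec_last_dig the_iterable (last_dig the_iterable)

-- ===== LEMMAS AND PROOFS =====

-- the forward fold's index component just counts the elements
theorem last_dig_foldB_idx (xs : List String) (r : Option (Int × Int)) (k : Int) :
    (xs.foldl last_dig_stepB (r, k)).2 = k + xs.length := by
  induction xs generalizing r k with
  | nil => simp
  | cons x xs ih =>
    simp only [List.foldl_cons, last_dig_stepB]
    rw [ih]
    simp only [List.length_cons]
    push_cast
    ring

-- forward last-match fold ≡ first match of the reversed list, with the matching offsets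
theorem last_dig_fold_eq_loopA (xs : List String) (r : Option (Int × Int)) (k : Int) :
    (xs.foldl last_dig_stepB (r, k)).1 =
      (match last_dig_loopA xs.reverse (k + xs.length) with
       | some v => some v
       | none => r) := by
  induction xs using List.reverseRecOn generalizing r k with
  | nil => simp [last_dig_loopA]
  | append_singleton xs x ih =>
    rw [List.foldl_append]
    have hpair : xs.foldl last_dig_stepB (r, k) =
        ((xs.foldl last_dig_stepB (r, k)).1, k + xs.length) := by
      rw [← last_dig_foldB_idx xs r k]
    rw [hpair]
    simp only [List.foldl_cons, List.foldl_nil, last_dig_stepB, List.reverse_append,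
      List.reverse_singleton, List.singleton_append, last_dig_loopA, List.length_append,
      List.length_singleton]
    push_cast
    rw [show (k + (↑xs.length + 1) - 1 : Int) = k + ↑xs.length from by ring]
    cases h : PySem.Int.ofStr? x with
    | none => simp [ih]
    | some v =>
      by_cases hv : v ∈ pvInts
      · simp [hv]
      · simp [hv, ih]

-- ===== VERDICT (by name: the statement is the Claim_ definition above) =====
theorem last_dig_spec : Claim_equal_last_dig := by
  intro xs _
  unfold Spec_last_dig last_dig last_dig_alt
  rw [PySem.List.slice?_none_none_neg_one]
  rw [last_dig_fold_eq_loopA xs none 0]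
  simp only [Int.zero_add]
  cases last_dig_loopA xs.reverse (xs.length : Int) <;> rfl
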